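-- pv_equiv track=rewrite | github.com/jh990714/BaekJoon-Algorithm | 프로그래머스/3/84021. 퍼즐 조각 채우기/퍼즐 조각 채우기.py | solution
-- ===== SOURCE A (Python) =====
-- from collections import deque
-- from collections import defaultdict
--
-- def solution(game_board, table):
--     row, column = len(game_board), len(game_board[0])
--     directions = [(1, 0), (-1, 0), (0, -1), (0, 1)]
--
--     def findPiece(board, target):
--         visited = [[False] * column for _ in range(row)]
--         number = 1
--         pieces = defaultdict(list)
--
--         for i in range(row):
--             for j in range(column):
--                 if board[i][j] == target and not visited[i][j]:
--                     pieces[number] = bfs((i, j), board, visited, target)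
--                     number += 1
--
--         return pieces
--
--     def bfs(start, board, visited, target):
--         que = deque([start])
--         visited[start[0]][start[1]] = True
--         path = [(start)]
--
--         min_x, min_y = start
--
--         while que:
--             x, y = que.popleft()
--
--             min_x = min(min_x, x)
--             min_y = min(min_y, y)
--
--             for dx, dy in directions:
--                 nx, ny = x + dx, y + dy
--
--                 if not (0 <= nx < row and 0 <= ny < column):
--                     continue
--
--                 if board[nx][ny] != target:
--                     continue
--
--                 if visited[nx][ny]:
--                     continue
--
--                 visited[nx][ny] = True
--                 que.append((nx, ny))
--                 path.append((nx, ny))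
--
--         path = [(x - min_x, y - min_y) for x, y in path]
--
--         return path
--
--     def rotate(piece):
--         # 90도 회전: (x, y) -> (y, -x)
--         rotated = [(y, -x) for x, y in piece]
--
--         # 최소 x, y를 찾아 (0, 0) 기준으로 정규화
--         min_x = min(x for x, y in rotated)
--         min_y = min(y for x, y in rotated)
--
--         normalized = [(x - min_x, y - min_y) for x, y in rotated]
--
--         return normalized
--
--     def match(blank, piece):
--         return sorted(blank) == sorted(piece)
--
--     blank_pieces = findPiece(game_board, 0)
--     pieces = findPiece(table, 1)
--
--     cnt = 0
--     for i, blank in blank_pieces.items():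
--         for key, piece in list(pieces.items()):
--             check = False
--             for _ in range(4):
--                 piece = rotate(piece)
--
--                 if match(blank, piece):
--                     cnt += len(blank)
--                     del pieces[key]
--
--                     check = True
--                     break
--
--             if check:
--                 break
--
--     return cnt
-- ===== SOURCE B (Python) =====
-- from collections import deque
--
-- # B: same flood-fill extraction, but the matching phase buckets pieces by a
-- # canonical rotation key in a dict of counts, replacing A's per-blank scan over
-- # all remaining pieces (re-rotating and re-sorting each) by a single key lookup.
-- def solution(game_board, table):
--     row, column = len(game_board), len(game_board[0])
--     directions = [(1, 0), (-1, 0), (0, -1), (0, 1)]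
--
--     def findPiece(board, target):
--         visited = [[False] * column for _ in range(row)]
--         pieces = []
--         for i in range(row):
--             for j in range(column):
--                 if board[i][j] == target and not visited[i][j]:
--                     pieces.append(bfs((i, j), board, visited, target))
--         return pieces
--
--     def bfs(start, board, visited, target):
--         que = deque([start])
--         visited[start[0]][start[1]] = True
--         path = [start]
--         min_x, min_y = start
--         while que:
--             x, y = que.popleft()
--             min_x = min(min_x, x)
--             min_y = min(min_y, y)
--             for dx, dy in directions:
--                 nx, ny = x + dx, y + dy
--                 if not (0 <= nx < row and 0 <= ny < column):
--                     continue
--                 if board[nx][ny] != target: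
--                     continue
--                 if visited[nx][ny]:
--                     continue
--                 visited[nx][ny] = True
--                 que.append((nx, ny))
--                 path.append((nx, ny))
--         return [(x - min_x, y - min_y) for x, y in path]
--
--     def rotate(piece):
--         rotated = [(y, -x) for x, y in piece]
--         min_x = min(x for x, y in rotated)
--         min_y = min(y for x, y in rotated)
--         return [(x - min_x, y - min_y) for x, y in rotated]
--
--     def canon(piece):
--         best = None
--         for _ in range(4):
--             piece = rotate(piece)
--             s = tuple(sorted(piece))
--             if best is None or s < best:
--                 best = s
--         return best
--
--     counts = {}
--     for piece in findPiece(table, 1):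
--         k = canon(piece)
--         counts[k] = counts.get(k, 0) + 1
--
--     cnt = 0
--     for blank in findPiece(game_board, 0):
--         k = canon(blank)
--         if counts.get(k, 0) > 0:
--             counts[k] -= 1
--             cnt += len(blank)
--     return cnt
-- ===== Notes on version B (the rewrite author's own statement) =====
-- stated objective: alternative
-- what changed: B keeps the flood-fill extraction but replaces A's matching phase - for every blank a rescan of all remaining pieces, re-rotating and re-sorting each - by computing once a canonical rotation key per piece, bucketing the pieces in a dict of counts, and matching each blank by a single key lookup (the extraction pass dominates the measured time, so a timing run shows no speedup).
import Mathlib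
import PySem

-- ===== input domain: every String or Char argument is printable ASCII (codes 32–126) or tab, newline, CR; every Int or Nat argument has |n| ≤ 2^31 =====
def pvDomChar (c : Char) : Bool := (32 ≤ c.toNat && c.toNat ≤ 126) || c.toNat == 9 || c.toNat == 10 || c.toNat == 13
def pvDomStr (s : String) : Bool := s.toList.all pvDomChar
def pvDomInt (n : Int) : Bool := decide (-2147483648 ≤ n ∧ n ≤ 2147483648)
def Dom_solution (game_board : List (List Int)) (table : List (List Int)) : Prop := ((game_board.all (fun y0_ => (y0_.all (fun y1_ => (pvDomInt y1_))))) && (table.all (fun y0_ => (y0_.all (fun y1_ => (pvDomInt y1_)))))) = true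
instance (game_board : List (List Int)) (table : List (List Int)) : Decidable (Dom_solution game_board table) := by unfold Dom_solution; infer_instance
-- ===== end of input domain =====

-- B keeps A's flood-fill extraction but replaces A's per-blank rescan of all remaining
-- pieces (4 rotations + sorts each) by a dict bucketing pieces under a canonical
-- rotation key, matched by one lookup per blank.

-- ===== PORT A =====

-- shared board/visited primitives (both Pythons contain this same flood-fill code)
def pvDirections : List (Int × Int) := [(1, 0), (-1, 0), (0, -1), (0, 1)]

-- board[i][j]; in range on every evaluated access under Pre_
def pvGet2 (board : List (List Int)) (i j : Int) : Int :=
  PySem.List.pyGetD (PySem.List.pyGetD board i []) j 0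

-- visited[i][j]
def pvGetV (v : List (List Bool)) (i j : Int) : Bool :=
  PySem.List.pyGetD (PySem.List.pyGetD v i []) j false

-- visited[i][j] = True
def pvSetV (v : List (List Bool)) (i j : Int) : List (List Bool) :=
  PySem.List.pySetD v i (PySem.List.pySetD (PySem.List.pyGetD v i []) j true)

-- number of still-False entries of visited (only used as the fuel bound of the while loop)
def pvUnvis (v : List (List Bool)) : Nat := (v.map (fun r => r.count false)).sum

-- one direction (dx,dy) of the inner `for` of the while loop; state = (que, visited, path)
def pvBfsStep (row column : Int) (board : List (List Int)) (target : Int) (x y : Int)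
    (st : List (Int × Int) × List (List Bool) × List (Int × Int)) (d : Int × Int) :
    List (Int × Int) × List (List Bool) × List (Int × Int) :=
  let nx := x + d.1
  let ny := y + d.2
  if ¬(0 ≤ nx ∧ nx < row ∧ 0 ≤ ny ∧ ny < column) then st
  else if pvGet2 board nx ny ≠ target then st
  else if pvGetV st.2.1 nx ny then st
  else (st.1 ++ [(nx, ny)], pvSetV st.2.1 nx ny, st.2.2 ++ [(nx, ny)])

-- the `while que:` loop; fuel-counted, the fuel chosen below is proved sufficient
def pvBfsLoop (row column : Int) (board : List (List Int)) (target : Int) :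
    Nat → List (Int × Int) → List (List Bool) → List (Int × Int) → Int → Int →
    (List (Int × Int) × Int × Int × List (List Bool))
  | _, [], visited, path, minx, miny => (path, minx, miny, visited)
  | 0, _ :: _, visited, path, minx, miny => (path, minx, miny, visited)
  | (f+1), (x, y) :: rest, visited, path, minx, miny =>
      let st := pvDirections.foldl (pvBfsStep row column board target x y) (rest, visited, path)
      pvBfsLoop row column board target f st.1 st.2.1 st.2.2 (min minx x) (min miny y)

-- bfs(start, board, visited, target); returns (normalized path, updated visited)
def pvBfs (row column : Int) (board : List (List Int)) (target : Int) (start : Int × Int)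
    (visited0 : List (List Bool)) : List (Int × Int) × List (List Bool) :=
  let visited1 := pvSetV visited0 start.1 start.2
  let r := pvBfsLoop row column board target (pvUnvis visited1 + 1)
      [start] visited1 [start] start.1 start.2
  ((r.1).map (fun p => (p.1 - r.2.1, p.2 - r.2.2.1)), r.2.2.2)

-- A's findPiece(board, target): dict number -> piece, numbers 1,2,…
def pvFindPieceA (row column : Int) (board : List (List Int)) (target : Int) :
    PySem.Dict Int (List (Int × Int)) :=
  let r := (PySem.List.pyRange 0 row 1).foldl (fun st i =>
      (PySem.List.pyRange 0 column 1).foldl (fun st j =>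
        if pvGet2 board i j == target && !(pvGetV st.1 i j) then
          let br := pvBfs row column board target (i, j) st.1
          (br.2, st.2.1 + 1, st.2.2.insert st.2.1 br.1)
        else st) st)
    (List.replicate row.toNat (List.replicate column.toNat false), (1 : Int),
      (PySem.Dict.empty : PySem.Dict Int (List (Int × Int))))
  r.2.2

-- rotate(piece): 90° rotation then normalization to (0,0)
def pvRotate (piece : List (Int × Int)) : List (Int × Int) :=
  let rotated := piece.map (fun p => (p.2, -p.1))
  let min_x := (PySem.List.min? (rotated.map Prod.fst) (fun x => x)).getD 0
  let min_y := (PySem.List.min? (rotated.map Prod.snd) (fun x => x)).getD 0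
  rotated.map (fun p => (p.1 - min_x, p.2 - min_y))

-- sorted(piece): Python sorts the (x, y) tuples lexicographically
def sortPairs (q : List (Int × Int)) : List (Int × Int) := PySem.List.sorted2 q Prod.fst Prod.snd

-- A's inner `for _ in range(4): piece = rotate(piece); if match(blank, piece): …`
def pvCheckRot : Nat → List (Int × Int) → List (Int × Int) → Bool
  | 0, _, _ => false
  | (n+1), blank, piece =>
      let piece' := pvRotate piece
      if sortPairs blank = sortPairs piece' then true else pvCheckRot n blank piece'

-- A's scan `for key, piece in list(pieces.items()): …` with `del pieces[key]` and break
def pvTryPieces (blank : List (Int × Int)) :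
    List (Int × List (Int × Int)) → PySem.Dict Int (List (Int × Int)) → Int →
    (PySem.Dict Int (List (Int × Int)) × Int)
  | [], pieces, cnt => (pieces, cnt)
  | (key, piece) :: rest, pieces, cnt =>
      if pvCheckRot 4 blank piece then (pieces.erase key, cnt + PySem.List.len blank)
      else pvTryPieces blank rest pieces cnt

def solution (game_board : List (List Int)) (table : List (List Int)) : Int :=
  let row := PySem.List.len game_board
  let column := PySem.List.len (PySem.List.pyGetD game_board 0 [])
  let blank_pieces := pvFindPieceA row column game_board 0
  let pieces0 := pvFindPieceA row column table 1
  let r := blank_pieces.items.foldl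
      (fun (st : PySem.Dict Int (List (Int × Int)) × Int) ib =>
        pvTryPieces ib.2 st.1.items st.1 st.2) (pieces0, 0)
  r.2

-- ===== PORT B =====

-- B's findPiece: same flood fill, pieces collected in a plain list
def pvFindPieceB (row column : Int) (board : List (List Int)) (target : Int) :
    List (List (Int × Int)) :=
  let r := (PySem.List.pyRange 0 row 1).foldl (fun st i =>
      (PySem.List.pyRange 0 column 1).foldl (fun st j =>
        if pvGet2 board i j == target && !(pvGetV st.1 i j) then
          let br := pvBfs row column board target (i, j) st.1
          (br.2, st.2 ++ [br.1])
        else st) st)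
    (List.replicate row.toNat (List.replicate column.toNat false),
      ([] : List (List (Int × Int))))
  r.2

-- Python's `<` on tuples of (int, int) tuples, hand-ported exactly (lexicographic,
-- a strict prefix is smaller); elements are compared lexicographically as pairs
def pvPairLt (a b : Int × Int) : Bool := a.1 < b.1 || (a.1 == b.1 && a.2 < b.2)

def pvListLt : List (Int × Int) → List (Int × Int) → Bool
  | [], [] => false
  | [], _ :: _ => true
  | _ :: _, [] => false
  | a :: as, b :: bs => pvPairLt a b || (a == b && pvListLt as bs)

-- canon(piece): min over the four successive rotations of tuple(sorted(…))
def pvCanonAux : Nat → List (Int × Int) → Option (List (Int × Int)) → Option (List (Int × Int))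
  | 0, _, best => best
  | (n+1), piece, best =>
      let piece' := pvRotate piece
      let s := sortPairs piece'
      let best' := match best with
        | none => some s
        | some b => if pvListLt s b then some s else some b
      pvCanonAux n piece' best'

def pvCanon (piece : List (Int × Int)) : List (Int × Int) :=
  (pvCanonAux 4 piece none).getD []

def solution_alt (game_board : List (List Int)) (table : List (List Int)) : Int :=
  let row := PySem.List.len game_board
  let column := PySem.List.len (PySem.List.pyGetD game_board 0 [])
  let counts := (pvFindPieceB row column table 1).foldl
      (fun (d : PySem.Dict (List (Int × Int)) Int) p =>
        let k := pvCanon p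
        d.insert k (d.getD k 0 + 1)) PySem.Dict.empty
  let r := (pvFindPieceB row column game_board 0).foldl
      (fun (st : PySem.Dict (List (Int × Int)) Int × Int) blank =>
        let k := pvCanon blank
        if st.1.getD k 0 > 0 then (st.1.insert k (st.1.getD k 0 - 1), st.2 + PySem.List.len blank)
        else st) (counts, 0)
  r.2

-- ===== PRECONDITION & SPEC =====

-- Pre_ is exactly where A returns: A raises IndexError on an empty game_board
-- (game_board[0]) and, unless row 0 of game_board is empty (then no cell is ever
-- indexed), on any game_board row shorter than row 0, and when table has fewer
-- rows than game_board or one of its first len(game_board) rows is shorter than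
-- game_board's row 0 (findPiece scans table with game_board's dimensions).
def Pre_solution (game_board : List (List Int)) (table : List (List Int)) : Prop :=
  game_board ≠ [] ∧
  (game_board.headD [] = [] ∨
    ((∀ r ∈ game_board, (game_board.headD []).length ≤ r.length) ∧
     game_board.length ≤ table.length ∧
     (∀ r ∈ table.take game_board.length, (game_board.headD []).length ≤ r.length)))
instance (game_board : List (List Int)) (table : List (List Int)) :
    Decidable (Pre_solution game_board table) := by unfold Pre_solution; infer_instance

def pvWitness_solution : List (List Int) × List (List Int) := ([[0]], [[1]])

def Spec_solution (game_board : List (List Int)) (table : List (List Int)) (out : Int) : Prop :=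
  out = solution_alt game_board table
instance (game_board : List (List Int)) (table : List (List Int)) (out : Int) :
    Decidable (Spec_solution game_board table out) := by unfold Spec_solution; infer_instance

-- ===== CLAIM (what is proved, stated in full; the proofs are below) =====
def Claim_equal_solution : Prop := ∀ (game_board : List (List Int)) (table : List (List Int)), Dom_solution game_board table → Pre_solution game_board table → Spec_solution game_board table (solution game_board table)

-- ===== LEMMAS AND PROOFS =====

-- a piece as bfs returns it: nonempty, coordinates ≥ 0, both minima attained
def pvNorm (q : List (Int × Int)) : Prop :=
  q ≠ [] ∧ (∀ c ∈ q, 0 ≤ c.1 ∧ 0 ≤ c.2) ∧ (∃ c ∈ q, c.1 = 0) ∧ (∃ c ∈ q, c.2 = 0)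

-- k-fold rotation
def pvRotN : Nat → List (Int × Int) → List (Int × Int)
  | 0, q => q
  | (n+1), q => pvRotate (pvRotN n q)

-- the four sorted rotations of q (the values A's inner loop compares against
-- and the values B's canon minimizes over)
def pvSMem (q v : List (Int × Int)) : Prop :=
  ∃ k, 1 ≤ k ∧ k ≤ 4 ∧ v = sortPairs (pvRotN k q)


theorem pvListLt_irrefl (a : List (Int × Int)) : pvListLt a a = false := by
  induction a with
  | nil => rfl
  | cons x xs ih =>
      simp [pvListLt, pvPairLt, ih]

theorem pvListLt_trichotomy (a b : List (Int × Int)) :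
    pvListLt a b = true ∨ pvListLt b a = true ∨ a = b := by
  induction a generalizing b with
  | nil => cases b with
    | nil => simp [pvListLt]
    | cons y ys => simp [pvListLt]
  | cons x xs ih =>
      cases b with
      | nil => simp [pvListLt]
      | cons y ys =>
          rcases ih ys with h | h | h <;>
          · rcases x with ⟨x1, x2⟩; rcases y with ⟨y1, y2⟩
            simp_all [pvListLt, pvPairLt, Prod.ext_iff]
            omega

theorem pvListLt_trans {a b c : List (Int × Int)} (h1 : pvListLt a b = true)
    (h2 : pvListLt b c = true) : pvListLt a c = true := by
  induction a generalizing b c with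
  | nil => cases c with
    | nil => cases b <;> simp_all [pvListLt]
    | cons z zs => simp [pvListLt]
  | cons x xs ih =>
      cases b with
      | nil => simp_all [pvListLt]
      | cons y ys =>
          cases c with
          | nil => simp_all [pvListLt]
          | cons z zs =>
              rcases x with ⟨x1, x2⟩; rcases y with ⟨y1, y2⟩; rcases z with ⟨z1, z2⟩
              simp_all [pvListLt, pvPairLt, Prod.ext_iff]
              rcases h1 with h1 | ⟨⟨e1, e2⟩, h1⟩ <;> rcases h2 with h2 | ⟨⟨f1, f2⟩, h2⟩
              · left; omega
              · subst f1; subst f2; left; omega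
              · subst e1; subst e2; left; omega
              · subst e1; subst e2; subst f1; subst f2
                right; exact ⟨⟨rfl, rfl⟩, ih h1 h2⟩

theorem pvListLt_notlt_trans {a b c : List (Int × Int)} (h1 : pvListLt a b = false)
    (h2 : pvListLt b c = false) : pvListLt a c = false := by
  by_contra h
  rw [Bool.not_eq_false] at h
  rcases pvListLt_trichotomy b a with hb | hb | hb
  · rw [pvListLt_trans hb h] at h2; exact absurd h2 (by simp)
  · rw [hb] at h1; exact absurd h1 (by simp)
  · subst hb; rw [h] at h2; exact absurd h2 (by simp)

theorem pvListLt_connex {a b : List (Int × Int)} (h1 : pvListLt a b = false)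
    (h2 : pvListLt b a = false) : a = b := by
  rcases pvListLt_trichotomy a b with h | h | h
  · rw [h] at h1; exact absurd h1 (by simp)
  · rw [h] at h2; exact absurd h2 (by simp)
  · exact h

theorem lexlt_eq : (fun (a b : Int × Int) => decide (a.1 < b.1) || !decide (b.1 < a.1) && decide (a.2 < b.2))
    = (fun a b => decide ((toLex a : Lex (Int × Int)) < toLex b)) := by
  funext a b
  rcases a with ⟨a1, a2⟩; rcases b with ⟨b1, b2⟩
  rw [Bool.eq_iff_iff]
  simp only [Prod.Lex.lt_iff, ofLex_toLex, Bool.or_eq_true, Bool.and_eq_true, Bool.not_eq_true',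
    decide_eq_true_eq, decide_eq_false_iff_not]
  omega

theorem sortPairs_eq (q : List (Int × Int)) :
    sortPairs q = PySem.List.sorted q (fun p => (toLex p : Lex (Int × Int))) := by
  show List.foldl (fun acc x => PySem.List.insertBy
      (fun (a b : Int × Int) => decide (a.1 < b.1) || !decide (b.1 < a.1) && decide (a.2 < b.2)) x acc) [] q = _
  rw [PySem.List.sorted_eq_foldl_insertBy, lexlt_eq]

theorem sortPairs_perm (q : List (Int × Int)) : (sortPairs q).Perm q :=
  PySem.List.sorted2_perm q _ _ _

theorem sortPairs_eq_iff {q q' : List (Int × Int)} : sortPairs q = sortPairs q' ↔ q.Perm q' := by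
  constructor
  · intro h
    exact ((sortPairs_perm q).symm.trans (h ▸ sortPairs_perm q'))
  · intro h
    have hp : (sortPairs q).Perm (sortPairs q') :=
      (sortPairs_perm q).trans (h.trans (sortPairs_perm q').symm)
    rw [sortPairs_eq, sortPairs_eq] at hp ⊢
    exact PySem.List.eq_of_perm_of_pairwise_le_of_injective _ toLex.injective hp
      (PySem.List.sorted_pairwise _ _) (PySem.List.sorted_pairwise _ _)

-- min(xs) for a nonempty list of ints, as the ports compute it
def pvMinD (l : List Int) : Int := (PySem.List.min? l (fun x => x)).getD 0

theorem pvMinD_le {l : List Int} {x : Int} (hx : x ∈ l) : pvMinD l ≤ x := by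
  unfold pvMinD
  rcases hm : PySem.List.min? l (fun x => x) with _ | m
  · rw [PySem.List.min?_eq_none_iff] at hm; subst hm; cases hx
  · exact PySem.List.min?_isMin hm x hx

theorem pvMinD_mem {l : List Int} (h : l ≠ []) : pvMinD l ∈ l := by
  unfold pvMinD
  rcases hm : PySem.List.min? l (fun x => x) with _ | m
  · rw [PySem.List.min?_eq_none_iff] at hm; exact absurd hm h
  · exact PySem.List.min?_mem hm

theorem pvMinD_perm {l l' : List Int} (h : l.Perm l') : pvMinD l = pvMinD l' := by
  rcases l with _ | ⟨x, xs⟩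
  · rw [h.nil_eq]
  · have h1 : l' ≠ [] := by intro e; subst e; exact absurd h.symm.nil_eq (by simp)
    exact le_antisymm (pvMinD_le (h.symm.mem_iff.mp (pvMinD_mem h1)))
      (pvMinD_le (h.mem_iff.mp (pvMinD_mem (by simp))))

-- rotate as a single map
def pvA (q : List (Int × Int)) : Int := pvMinD (q.map (fun p => p.2))
def pvB (q : List (Int × Int)) : Int := pvMinD (q.map (fun p => -p.1))

theorem rotate_eq_map (q : List (Int × Int)) :
    pvRotate q = q.map (fun p => (p.2 - pvA q, -p.1 - pvB q)) := by
  unfold pvRotate pvA pvB pvMinD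
  simp [List.map_map, Function.comp_def]

theorem rotate_perm {q q' : List (Int × Int)} (h : q.Perm q') :
    (pvRotate q).Perm (pvRotate q') := by
  rw [rotate_eq_map, rotate_eq_map]
  rw [show pvA q = pvA q' from pvMinD_perm (h.map _),
      show pvB q = pvB q' from pvMinD_perm (h.map _)]
  exact h.map _

theorem rotate_ne_nil {q : List (Int × Int)} (h : q ≠ []) : pvRotate q ≠ [] := by
  rw [rotate_eq_map]; simpa using h

theorem rotate_norm {q : List (Int × Int)} (h : q ≠ []) : pvNorm (pvRotate q) := by
  rw [rotate_eq_map]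
  refine ⟨by simpa using h, ?_, ?_, ?_⟩
  · rintro c hc
    simp only [List.mem_map] at hc
    obtain ⟨p, hp, rfl⟩ := hc
    constructor
    · have := pvMinD_le (l := q.map (fun p => p.2)) (List.mem_map_of_mem hp)
      unfold pvA; omega
    · have := pvMinD_le (l := q.map (fun p => -p.1)) (List.mem_map_of_mem hp)
      unfold pvB; omega
  · have hmem : pvA q ∈ q.map (fun p => p.2) := pvMinD_mem (by simpa using h)
    simp only [List.mem_map] at hmem
    obtain ⟨p, hp, hpa⟩ := hmem
    exact ⟨_, List.mem_map_of_mem hp, by simp [hpa]⟩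
  · have hmem : pvB q ∈ q.map (fun p => -p.1) := pvMinD_mem (by simpa using h)
    simp only [List.mem_map] at hmem
    obtain ⟨p, hp, hpb⟩ := hmem
    exact ⟨_, List.mem_map_of_mem hp, by simp [← hpb]⟩

theorem rotN_succ_comm (n : Nat) (q : List (Int × Int)) :
    pvRotN n (pvRotate q) = pvRotN (n+1) q := by
  induction n with
  | zero => rfl
  | succ n ih => show pvRotate (pvRotN n (pvRotate q)) = _; rw [ih]; rfl

theorem rotN_add (m n : Nat) (q : List (Int × Int)) :
    pvRotN (m + n) q = pvRotN m (pvRotN n q) := by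
  induction m with
  | zero => simp [pvRotN]
  | succ m ih =>
      have h : m + 1 + n = (m + n) + 1 := by omega
      rw [h]
      show pvRotate (pvRotN (m + n) q) = _
      rw [ih]; rfl

theorem rotN_ne_nil {q : List (Int × Int)} (h : q ≠ []) (n : Nat) : pvRotN n q ≠ [] := by
  induction n with
  | zero => exact h
  | succ n ih => exact rotate_ne_nil ih

theorem rotN_norm {q : List (Int × Int)} (h : q ≠ []) {n : Nat} (hn : 1 ≤ n) :
    pvNorm (pvRotN n q) := by
  rcases n with _ | n
  · omega
  · exact rotate_norm (rotN_ne_nil h n)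

theorem rotN_perm {q q' : List (Int × Int)} (h : q.Perm q') (n : Nat) :
    (pvRotN n q).Perm (pvRotN n q') := by
  induction n with
  | zero => exact h
  | succ n ih => exact rotate_perm ih

theorem rot4_translate (q : List (Int × Int)) :
    ∃ t1 t2, pvRotN 4 q = q.map (fun p => (p.1 + t1, p.2 + t2)) := by
  refine ⟨pvB q + pvA (pvRotate q) - pvB (pvRotN 2 q) - pvA (pvRotN 3 q),
          -pvA q + pvB (pvRotate q) + pvA (pvRotN 2 q) - pvB (pvRotN 3 q), ?_⟩
  show pvRotate (pvRotate (pvRotate (pvRotate q))) = _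
  have h3 : pvRotN 3 q = pvRotate (pvRotate (pvRotate q)) := rfl
  have h2 : pvRotN 2 q = pvRotate (pvRotate q) := rfl
  rw [h3, h2]
  rw [rotate_eq_map (pvRotate (pvRotate (pvRotate q)))]
  rw [rotate_eq_map (pvRotate (pvRotate q))]
  rw [rotate_eq_map (pvRotate q)]
  rw [rotate_eq_map q]
  simp only [List.map_map]
  apply List.map_congr_left
  intro p hp
  simp only [Function.comp_def]
  apply Prod.ext <;> dsimp <;> ring

theorem rot4_id {q : List (Int × Int)} (h : pvNorm q) : pvRotN 4 q = q := by
  obtain ⟨hne, hpos, ⟨c1, hc1, hc1x⟩, ⟨c2, hc2, hc2y⟩⟩ := h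
  obtain ⟨t1, t2, heq⟩ := rot4_translate q
  have hnorm4 : pvNorm (pvRotN 4 q) := rotN_norm hne (by omega)
  obtain ⟨_, hpos4, ⟨d1, hd1, hd1x⟩, ⟨d2, hd2, hd2y⟩⟩ := hnorm4
  -- t1 = 0
  rw [heq] at hd1 hd2 hpos4
  simp only [List.mem_map] at hd1 hd2
  obtain ⟨p1, hp1, hp1e⟩ := hd1
  obtain ⟨p2, hp2, hp2e⟩ := hd2
  have ht1 : t1 = 0 := by
    have h1 : p1.1 + t1 = 0 := by
      have := congrArg Prod.fst hp1e; simpa [hd1x] using this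
    have h2 : 0 ≤ p1.1 := (hpos _ hp1).1
    have h3 : 0 ≤ c1.1 + t1 := (hpos4 _ (List.mem_map_of_mem hc1)).1
    omega
  have ht2 : t2 = 0 := by
    have h1 : p2.2 + t2 = 0 := by
      have := congrArg Prod.snd hp2e; simpa [hd2y] using this
    have h2 : 0 ≤ p2.2 := (hpos _ hp2).2
    have h3 : 0 ≤ c2.2 + t2 := (hpos4 _ (List.mem_map_of_mem hc2)).2
    omega
  rw [heq, ht1, ht2]
  simp

theorem rotN_period {q : List (Int × Int)} (h : q ≠ []) {k : Nat} (hk : 1 ≤ k) :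
    pvRotN (k + 4) q = pvRotN k q := by
  rw [Nat.add_comm, rotN_add]
  exact rot4_id (rotN_norm h hk)

theorem rotN_congr_mod {q : List (Int × Int)} (h : q ≠ []) {m m' : Nat}
    (hm : 1 ≤ m) (hm' : 1 ≤ m') (hmod : m % 4 = m' % 4) : pvRotN m q = pvRotN m' q := by
  rcases Nat.le_total m m' with hle | hle
  · obtain ⟨t, rfl⟩ : ∃ t, m' = m + 4 * t := ⟨(m' - m) / 4, by omega⟩
    clear hmod hle hm'
    induction t with
    | zero => rfl
    | succ t ih =>
        have : m + 4 * (t + 1) = (m + 4 * t) + 4 := by omega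
        rw [this, rotN_period h (by omega), ih]
  · obtain ⟨t, rfl⟩ : ∃ t, m = m' + 4 * t := ⟨(m - m') / 4, by omega⟩
    clear hmod hle hm
    induction t with
    | zero => rfl
    | succ t ih =>
        have : m' + 4 * (t + 1) = (m' + 4 * t) + 4 := by omega
        rw [this, rotN_period h (by omega), ih]

-- running minimum under pvListLt, as B's canon loop maintains it
def pvFoldMin (l : List (List (Int × Int))) (m0 : List (Int × Int)) : List (Int × Int) :=
  l.foldl (fun m s => if pvListLt s m then s else m) m0

theorem pvFoldMin_cons (s : List (Int × Int)) (t : List (List (Int × Int))) (m0 : List (Int × Int)) :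
    pvFoldMin (s :: t) m0 = pvFoldMin t (if pvListLt s m0 then s else m0) := rfl

theorem pvFoldMin_mem (l : List (List (Int × Int))) (m0 : List (Int × Int)) :
    pvFoldMin l m0 = m0 ∨ pvFoldMin l m0 ∈ l := by
  induction l generalizing m0 with
  | nil => left; rfl
  | cons s t ih =>
      rw [pvFoldMin_cons]
      split
      · rcases ih s with h | h
        · right; rw [h]; exact List.mem_cons_self
        · right; exact List.mem_cons_of_mem _ h
      · rcases ih m0 with h | h
        · left; exact h
        · right; exact List.mem_cons_of_mem _ h

theorem pvFoldMin_least (l : List (List (Int × Int))) (m0 : List (Int × Int)) :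
    ∀ v, (v = m0 ∨ v ∈ l) → pvListLt v (pvFoldMin l m0) = false := by
  induction l generalizing m0 with
  | nil =>
      rintro v (rfl | h)
      · exact pvListLt_irrefl v
      · cases h
  | cons s t ih =>
      rintro v (rfl | hv)
      · rw [pvFoldMin_cons]
        split
        · next hlt =>
          have h1 : pvListLt s (pvFoldMin t s) = false := ih s s (Or.inl rfl)
          by_contra hc
          rw [Bool.not_eq_false] at hc
          rw [pvListLt_trans hlt hc] at h1
          exact absurd h1 (by simp)
        · exact ih v v (Or.inl rfl)
      · rcases List.mem_cons.mp hv with rfl | hv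
        · rw [pvFoldMin_cons]
          split
          · exact ih v v (Or.inl rfl)
          · next hlt =>
            have h1 : pvListLt m0 (pvFoldMin t m0) = false := ih m0 m0 (Or.inl rfl)
            rw [Bool.not_eq_true] at hlt
            exact pvListLt_notlt_trans hlt h1
        · rw [pvFoldMin_cons]
          split
          · exact ih s v (Or.inr hv)
          · exact ih m0 v (Or.inr hv)

-- the canon loop is that running minimum over the sorted rotations
theorem canonAux_eq (n : Nat) : ∀ (p m : List (Int × Int)),
    pvCanonAux n p (some m) =
      some (pvFoldMin ((List.range n).map (fun j => sortPairs (pvRotN (j+1) p))) m) := by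
  induction n with
  | zero => intro p m; rfl
  | succ n ih =>
      intro p m
      have hstep : pvCanonAux (n+1) p (some m) = pvCanonAux n (pvRotate p)
          (some (if pvListLt (sortPairs (pvRotate p)) m then sortPairs (pvRotate p) else m)) := by
        simp only [pvCanonAux]
        split <;> rfl
      rw [hstep, ih]
      congr 1
      rw [List.range_succ_eq_map]
      simp only [List.map_cons, List.map_map]
      have harg : (List.map ((fun j => sortPairs (pvRotN (j+1) p)) ∘ (fun i => i + 1)) (List.range n))
          = (List.range n).map fun j => sortPairs (pvRotN (j+1) (pvRotate p)) := by
        apply List.map_congr_left; intro j _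
        show sortPairs (pvRotN (j+1+1) p) = _
        rw [rotN_succ_comm]
      rw [harg, pvFoldMin_cons]
      rfl

theorem canon_eq (q : List (Int × Int)) :
    pvCanon q = pvFoldMin ((List.range 3).map (fun j => sortPairs (pvRotN (j+2) q)))
      (sortPairs (pvRotN 1 q)) := by
  show (pvCanonAux 3 (pvRotate q) (some (sortPairs (pvRotate q)))).getD [] = _
  rw [canonAux_eq]
  simp only [Option.getD_some]
  have harg : ((List.range 3).map (fun j => sortPairs (pvRotN (j+1) (pvRotate q))))
      = ((List.range 3).map (fun j => sortPairs (pvRotN (j+2) q))) := by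
    apply List.map_congr_left; intro j _
    show sortPairs (pvRotN (j+1) (pvRotate q)) = _
    rw [rotN_succ_comm]
  rw [harg]
  rfl

theorem canon_smem (q : List (Int × Int)) : pvSMem q (pvCanon q) := by
  rw [canon_eq]
  rcases pvFoldMin_mem ((List.range 3).map (fun j => sortPairs (pvRotN (j+2) q)))
      (sortPairs (pvRotN 1 q)) with h | h
  · exact ⟨1, by omega, by omega, h⟩
  · simp only [List.mem_map, List.mem_range] at h
    obtain ⟨j, hj, he⟩ := h
    exact ⟨j + 2, by omega, by omega, he.symm⟩

theorem canon_least (q : List (Int × Int)) :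
    ∀ v, pvSMem q v → pvListLt v (pvCanon q) = false := by
  rintro v ⟨k, hk1, hk4, rfl⟩
  rw [canon_eq]
  apply pvFoldMin_least
  interval_cases k
  · exact Or.inl rfl
  · exact Or.inr (by simp only [List.mem_map, List.mem_range]; exact ⟨0, by omega, rfl⟩)
  · exact Or.inr (by simp only [List.mem_map, List.mem_range]; exact ⟨1, by omega, rfl⟩)
  · exact Or.inr (by simp only [List.mem_map, List.mem_range]; exact ⟨2, by omega, rfl⟩)

theorem canon_congr {b p : List (Int × Int)} (h : ∀ v, pvSMem b v ↔ pvSMem p v) :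
    pvCanon b = pvCanon p := by
  apply pvListLt_connex
  · exact canon_least p _ ((h _).mp (canon_smem b))
  · exact canon_least b _ ((h _).mpr (canon_smem p))

-- A's four-rotation check, characterized
theorem checkRot_iff (n : Nat) : ∀ (b p : List (Int × Int)),
    pvCheckRot n b p = true ↔ ∃ k, 1 ≤ k ∧ k ≤ n ∧ sortPairs b = sortPairs (pvRotN k p) := by
  induction n with
  | zero => intro b p; simp [pvCheckRot]
  | succ n ih =>
      intro b p
      show (if sortPairs b = sortPairs (pvRotate p) then true else pvCheckRot n b (pvRotate p)) = true ↔ _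
      split
      · next he =>
        simp only [true_iff]
        exact ⟨1, by omega, by omega, he⟩
      · next he =>
        rw [ih]
        constructor
        · rintro ⟨k, h1, h2, h3⟩
          exact ⟨k + 1, by omega, by omega, by rwa [← rotN_succ_comm]⟩
        · rintro ⟨k, h1, h2, h3⟩
          rcases Nat.eq_or_lt_of_le h1 with rfl | hgt
          · exact absurd h3 he
          · refine ⟨k - 1, by omega, by omega, ?_⟩
            rw [rotN_succ_comm]
            have hke : k - 1 + 1 = k := by omega
            rw [hke]; exact h3

-- the heart: A's rotation scan succeeds iff the canonical keys agree
theorem match_iff {b p : List (Int × Int)} (hb : pvNorm b) (hp : p ≠ []) :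
    (pvCheckRot 4 b p = true) ↔ pvCanon b = pvCanon p := by
  have hbne : b ≠ [] := hb.1
  constructor
  · intro h
    obtain ⟨k, hk1, hk4, hs⟩ := (checkRot_iff 4 b p).mp h
    have hperm : b.Perm (pvRotN k p) := sortPairs_eq_iff.mp hs
    apply canon_congr
    intro v
    constructor
    · rintro ⟨j, hj1, hj4, rfl⟩
      refine ⟨(j + k - 1) % 4 + 1, by omega, by omega, ?_⟩
      have h1 : (pvRotN j b).Perm (pvRotN (j + k) p) := by
        rw [rotN_add j k p]; exact rotN_perm hperm j
      have h2 : pvRotN (j + k) p = pvRotN ((j + k - 1) % 4 + 1) p :=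
        rotN_congr_mod hp (by omega) (by omega) (by omega)
      rw [← h2]
      exact sortPairs_eq_iff.mpr h1
    · rintro ⟨j, hj1, hj4, rfl⟩
      refine ⟨(j + 4 - k - 1) % 4 + 1, by omega, by omega, ?_⟩
      have h1 : (pvRotN ((j + 4 - k - 1) % 4 + 1) b).Perm (pvRotN ((j + 4 - k - 1) % 4 + 1 + k) p) := by
        rw [rotN_add ((j + 4 - k - 1) % 4 + 1) k p]; exact rotN_perm hperm _
      have h2 : pvRotN ((j + 4 - k - 1) % 4 + 1 + k) p = pvRotN j p :=
        rotN_congr_mod hp (by omega) (by omega) (by omega)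
      rw [← h2]
      exact (sortPairs_eq_iff.mpr h1).symm
  · intro h
    obtain ⟨i, hi1, hi4, hci⟩ := canon_smem b
    obtain ⟨j, hj1, hj4, hcj⟩ := canon_smem p
    have hs : sortPairs (pvRotN i b) = sortPairs (pvRotN j p) := by rw [← hci, ← hcj, h]
    have hperm : (pvRotN i b).Perm (pvRotN j p) := sortPairs_eq_iff.mp hs
    apply (checkRot_iff 4 b p).mpr
    refine ⟨(4 - i + j - 1) % 4 + 1, by omega, by omega, ?_⟩
    have hb4 : b = pvRotN (4 - i) (pvRotN i b) := by
      rw [← rotN_add]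
      have : 4 - i + i = 4 := by omega
      rw [this, rot4_id hb]
    have h1 : b.Perm (pvRotN (4 - i + j) p) := by
      rw [rotN_add (4 - i) j p]
      conv_lhs => rw [hb4]
      exact rotN_perm hperm _
    have h2 : pvRotN (4 - i + j) p = pvRotN ((4 - i + j - 1) % 4 + 1) p :=
      rotN_congr_mod hp (by omega) (by omega) (by omega)
    rw [← h2]
    exact sortPairs_eq_iff.mpr h1

-- ---------- BFS invariants ----------

-- well-formed visited matrix
def pvWf (row column : Int) (v : List (List Bool)) : Prop :=
  v.length = row.toNat ∧ ∀ r ∈ v, r.length = column.toNat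

theorem sum_map_set {α : Type} (f : α → Nat) :
    ∀ (v : List α) (n : Nat) (x : α) (h : n < v.length),
    ((v.set n x).map f).sum + f (v[n]) = (v.map f).sum + f x := by
  intro v
  induction v with
  | nil => intro n x h; simp at h
  | cons a t ih =>
      intro n x h
      cases n with
      | zero => simp [List.set]; omega
      | succ n =>
          simp only [List.set, List.map_cons, List.sum_cons, List.getElem_cons_succ]
          have := ih n x (by simpa using h)
          omega

theorem count_false_set : ∀ (r : List Bool) (m : Nat) (hm : m < r.length), r[m] = false →
    (r.set m true).count false + 1 = r.count false := by
  intro r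
  induction r with
  | nil => intro m h; simp at h
  | cons a t ih =>
      intro m hm hget
      cases m with
      | zero =>
          simp only [List.getElem_cons_zero] at hget
          subst hget
          simp [List.set]
      | succ m =>
          simp only [List.getElem_cons_succ] at hget
          have := ih m (by simpa using hm) hget
          simp only [List.set, List.count_cons]
          omega

theorem setV_eq {v : List (List Bool)} {i j : Int} (hi0 : 0 ≤ i) (hiv : i.toNat < v.length)
    (_hjv : j.toNat < (v[i.toNat]).length) (hj0 : 0 ≤ j) :
    pvSetV v i j = v.set i.toNat ((v[i.toNat]).set j.toNat true) := by
  unfold pvSetV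
  rw [PySem.List.pySetD_of_nonneg _ _ hi0, PySem.List.pySetD_of_nonneg _ _ hj0]
  congr 2
  rw [PySem.List.pyGetD_eq_getElem _ _ hi0 (by omega)]

theorem getV_eq {v : List (List Bool)} {i j : Int} (hi0 : 0 ≤ i) (hiv : i.toNat < v.length)
    (hjv : j.toNat < (v[i.toNat]).length) (hj0 : 0 ≤ j) :
    pvGetV v i j = (v[i.toNat])[j.toNat] := by
  unfold pvGetV
  rw [PySem.List.pyGetD_eq_getElem _ _ hi0 (by omega)]
  rw [PySem.List.pyGetD_eq_getElem _ _ hj0 (by omega)]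

theorem wf_setV {row column : Int} {v : List (List Bool)} (h : pvWf row column v)
    {i j : Int} (hi0 : 0 ≤ i) (hi : i < row) (hj0 : 0 ≤ j) (hj : j < column) :
    pvWf row column (pvSetV v i j) := by
  obtain ⟨h1, h2⟩ := h
  have hiv : i.toNat < v.length := by omega
  have hjv : j.toNat < (v[i.toNat]).length := by
    rw [h2 _ (List.getElem_mem hiv)]; omega
  rw [setV_eq hi0 hiv hjv hj0]
  constructor
  · simpa using h1
  · intro r hr
    rcases List.mem_or_eq_of_mem_set hr with hr | rfl
    · exact h2 r hr
    · simp only [List.length_set]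
      exact h2 _ (List.getElem_mem hiv)

theorem unvis_setV {row column : Int} {v : List (List Bool)} (h : pvWf row column v)
    {i j : Int} (hi0 : 0 ≤ i) (hi : i < row) (hj0 : 0 ≤ j) (hj : j < column)
    (hget : pvGetV v i j = false) :
    pvUnvis (pvSetV v i j) + 1 = pvUnvis v := by
  obtain ⟨h1, h2⟩ := h
  have hiv : i.toNat < v.length := by omega
  have hjv : j.toNat < (v[i.toNat]).length := by
    rw [h2 _ (List.getElem_mem hiv)]; omega
  rw [getV_eq hi0 hiv hjv hj0] at hget
  rw [setV_eq hi0 hiv hjv hj0]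
  unfold pvUnvis
  have hs := sum_map_set (fun r => r.count false) v i.toNat ((v[i.toNat]).set j.toNat true) hiv
  have hc := count_false_set (v[i.toNat]) j.toNat hjv hget
  omega

theorem step_spec (row column : Int) (board : List (List Int)) (target x y : Int)
    (st : List (Int × Int) × List (List Bool) × List (Int × Int)) (d : Int × Int)
    (hwf : pvWf row column st.2.1) :
    pvWf row column (pvBfsStep row column board target x y st d).2.1 ∧
    (pvBfsStep row column board target x y st d).1.length
      + pvUnvis (pvBfsStep row column board target x y st d).2.1
      ≤ st.1.length + pvUnvis st.2.1 ∧
    ∃ app, (pvBfsStep row column board target x y st d).1 = st.1 ++ app ∧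
      (pvBfsStep row column board target x y st d).2.2 = st.2.2 ++ app := by
  unfold pvBfsStep
  simp only []
  split
  · exact ⟨hwf, le_refl _, [], by simp, by simp⟩
  · next hrange =>
    rw [Classical.not_not] at hrange
    obtain ⟨h1, h2, h3, h4⟩ := hrange
    split
    · exact ⟨hwf, le_refl _, [], by simp, by simp⟩
    · split
      · exact ⟨hwf, le_refl _, [], by simp, by simp⟩
      · next hget =>
        rw [Bool.not_eq_true] at hget
        refine ⟨wf_setV hwf h1 h2 h3 h4, ?_, [(x + d.1, y + d.2)], rfl, rfl⟩
        have := unvis_setV hwf h1 h2 h3 h4 hget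
        simp only [List.length_append, List.length_cons, List.length_nil]
        omega

theorem fold_step_spec (row column : Int) (board : List (List Int)) (target x y : Int) :
    ∀ (ds : List (Int × Int)) (st : List (Int × Int) × List (List Bool) × List (Int × Int)),
    pvWf row column st.2.1 →
    pvWf row column (ds.foldl (pvBfsStep row column board target x y) st).2.1 ∧
    (ds.foldl (pvBfsStep row column board target x y) st).1.length
      + pvUnvis (ds.foldl (pvBfsStep row column board target x y) st).2.1
      ≤ st.1.length + pvUnvis st.2.1 ∧
    ∃ app, (ds.foldl (pvBfsStep row column board target x y) st).1 = st.1 ++ app ∧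
      (ds.foldl (pvBfsStep row column board target x y) st).2.2 = st.2.2 ++ app := by
  intro ds
  induction ds with
  | nil => intro st h; exact ⟨h, le_refl _, [], by simp, by simp⟩
  | cons d ds ih =>
      intro st h
      obtain ⟨hw1, hm1, app1, ha1, hb1⟩ := step_spec row column board target x y st d h
      obtain ⟨hw2, hm2, app2, ha2, hb2⟩ := ih _ hw1
      refine ⟨hw2, by simp only [List.foldl_cons] at *; omega, app1 ++ app2, ?_, ?_⟩
      · simp only [List.foldl_cons, ha2, ha1, List.append_assoc]
      · simp only [List.foldl_cons, hb2, hb1, List.append_assoc]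

theorem bfsLoop_spec (row column : Int) (board : List (List Int)) (target : Int) :
    ∀ (f : Nat) (que : List (Int × Int)) (visited : List (List Bool))
      (path : List (Int × Int)) (minx miny : Int),
    que.length + pvUnvis visited ≤ f →
    pvWf row column visited →
    (∀ c ∈ que, c ∈ path) →
    (∀ c ∈ path, c ∈ que ∨ (minx ≤ c.1 ∧ miny ≤ c.2)) →
    (∃ c ∈ path, c.1 = minx) → (∃ c ∈ path, c.2 = miny) → path ≠ [] →
    (∀ c ∈ (pvBfsLoop row column board target f que visited path minx miny).1,
        (pvBfsLoop row column board target f que visited path minx miny).2.1 ≤ c.1 ∧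
        (pvBfsLoop row column board target f que visited path minx miny).2.2.1 ≤ c.2) ∧
    (∃ c ∈ (pvBfsLoop row column board target f que visited path minx miny).1,
        c.1 = (pvBfsLoop row column board target f que visited path minx miny).2.1) ∧
    (∃ c ∈ (pvBfsLoop row column board target f que visited path minx miny).1,
        c.2 = (pvBfsLoop row column board target f que visited path minx miny).2.2.1) ∧
    (pvBfsLoop row column board target f que visited path minx miny).1 ≠ [] ∧
    pvWf row column (pvBfsLoop row column board target f que visited path minx miny).2.2.2 := by
  intro f
  induction f with
  | zero =>
      intro que visited path minx miny h1 h2 h3 h4 h5 h6 h7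
      have hq : que = [] := by
        cases que with
        | nil => rfl
        | cons a t => simp at h1
      subst hq
      refine ⟨?_, h5, h6, h7, h2⟩
      intro c hc
      rcases h4 c hc with h | h
      · cases h
      · exact h
  | succ f ih =>
      intro que visited path minx miny h1 h2 h3 h4 h5 h6 h7
      cases que with
      | nil =>
          refine ⟨?_, h5, h6, h7, h2⟩
          intro c hc
          rcases h4 c hc with h | h
          · cases h
          · exact h
      | cons xy rest =>
          rcases xy with ⟨x, y⟩
          show _ ∧ _ ∧ _ ∧ _ ∧ _
          obtain ⟨hw, hm, app, hap, hbp⟩ := fold_step_spec row column board target x y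
            pvDirections (rest, visited, path) h2
          set st := pvDirections.foldl (pvBfsStep row column board target x y) (rest, visited, path) with hst
          have hxy : (x, y) ∈ path := h3 (x, y) List.mem_cons_self
          apply ih st.1 st.2.1 st.2.2 (min minx x) (min miny y)
          · simp only [List.length_cons] at h1
            simp only [hap, List.length_append] at *
            omega
          · exact hw
          · intro c hc
            rw [hap] at hc
            rw [hbp]
            rcases List.mem_append.mp hc with h | h
            · exact List.mem_append_left _ (h3 c (List.mem_cons_of_mem _ h))
            · exact List.mem_append_right _ h
          · intro c hc
            rw [hbp] at hc
            rcases List.mem_append.mp hc with h | h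
            · rcases h4 c h with h' | h'
              · rcases List.mem_cons.mp h' with rfl | h''
                · right; constructor
                  · simp
                  · simp
                · left; rw [hap]; exact List.mem_append_left _ h''
              · right; exact ⟨le_trans (min_le_left _ _) h'.1, le_trans (min_le_left _ _) h'.2⟩
            · left; rw [hap]; exact List.mem_append_right _ h
          · rcases le_total minx x with hmx | hmx
            · obtain ⟨c, hc, hcx⟩ := h5
              exact ⟨c, by rw [hbp]; exact List.mem_append_left _ hc, by rw [hcx]; omega⟩
            · exact ⟨(x, y), by rw [hbp]; exact List.mem_append_left _ hxy, by simp; omega⟩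
          · rcases le_total miny y with hmy | hmy
            · obtain ⟨c, hc, hcy⟩ := h6
              exact ⟨c, by rw [hbp]; exact List.mem_append_left _ hc, by rw [hcy]; omega⟩
            · exact ⟨(x, y), by rw [hbp]; exact List.mem_append_left _ hxy, by simp; omega⟩
          · rw [hbp]; intro he; simp at he; exact h7 he.1

theorem bfs_spec (row column : Int) (board : List (List Int)) (target : Int)
    (start : Int × Int) (visited0 : List (List Bool))
    (hwf : pvWf row column visited0)
    (hs1 : 0 ≤ start.1) (hs2 : start.1 < row) (hs3 : 0 ≤ start.2) (hs4 : start.2 < column) :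
    pvNorm (pvBfs row column board target start visited0).1 ∧
    pvWf row column (pvBfs row column board target start visited0).2 := by
  unfold pvBfs
  have hwf1 : pvWf row column (pvSetV visited0 start.1 start.2) := wf_setV hwf hs1 hs2 hs3 hs4
  obtain ⟨hb, he1, he2, hne, hwf2⟩ := bfsLoop_spec row column board target
    (pvUnvis (pvSetV visited0 start.1 start.2) + 1) [start] (pvSetV visited0 start.1 start.2)
    [start] start.1 start.2
    (by simp only [List.length_cons, List.length_nil]; omega) hwf1
    (by intro c hc; exact hc)
    (by intro c hc; left; exact hc)
    ⟨start, by simp⟩ ⟨start, by simp⟩ (by simp)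
  refine ⟨⟨by simpa using hne, ?_, ?_, ?_⟩, hwf2⟩
  · rintro c hc
    simp only [List.mem_map] at hc
    obtain ⟨p, hp, rfl⟩ := hc
    have := hb p hp
    constructor <;> simp <;> omega
  · obtain ⟨c, hc, hcx⟩ := he1
    exact ⟨_, List.mem_map_of_mem hc, by simp [hcx]⟩
  · obtain ⟨c, hc, hcy⟩ := he2
    exact ⟨_, List.mem_map_of_mem hc, by simp [hcy]⟩

-- ---------- extraction: A's dict and B's list hold the same pieces ----------

-- coupled states of A's and B's findPiece scans
def pvScanInv (row column : Int)
    (stA : List (List Bool) × Int × PySem.Dict Int (List (Int × Int)))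
    (stB : List (List Bool) × List (List (Int × Int))) : Prop :=
  stA.1 = stB.1 ∧ pvWf row column stA.1 ∧ stA.2.2.values = stB.2 ∧
  stA.2.2.keys.Nodup ∧ (∀ k ∈ stA.2.2.keys, k < stA.2.1) ∧ (∀ p ∈ stB.2, pvNorm p)

theorem dict_insert_fresh_values {d : PySem.Dict Int (List (Int × Int))} {k : Int}
    (v : List (Int × Int)) (h : k ∉ d.keys) :
    (d.insert k v).values = d.values ++ [v] ∧ (d.insert k v).keys = d.keys ++ [k] := by
  have hc : d.contains k = false := by
    rcases hb : d.contains k with _ | _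
    · rfl
    · exact absurd ((PySem.Dict.contains_iff_mem_keys d k).mp hb) h
  constructor
  · show ((d.insert k v).items).map (·.2) = (d.items).map (·.2) ++ [v]
    rw [PySem.Dict.items_insert_of_not_contains d v hc]
    simp
  · exact PySem.Dict.keys_insert_of_not_contains d v hc

theorem scan_cell_rel (row column : Int) (board : List (List Int)) (target : Int)
    {i j : Int} (hi0 : 0 ≤ i) (hi : i < row) (hj0 : 0 ≤ j) (hj : j < column)
    {stA : List (List Bool) × Int × PySem.Dict Int (List (Int × Int))}
    {stB : List (List Bool) × List (List (Int × Int))}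
    (h : pvScanInv row column stA stB) :
    pvScanInv row column
      (if pvGet2 board i j == target && !(pvGetV stA.1 i j) then
        ((pvBfs row column board target (i, j) stA.1).2, stA.2.1 + 1,
          stA.2.2.insert stA.2.1 (pvBfs row column board target (i, j) stA.1).1)
      else stA)
      (if pvGet2 board i j == target && !(pvGetV stB.1 i j) then
        ((pvBfs row column board target (i, j) stB.1).2,
          stB.2 ++ [(pvBfs row column board target (i, j) stB.1).1])
      else stB) := by
  obtain ⟨h1, h2, h3, h4, h5, h6⟩ := h
  rw [← h1]
  split
  · obtain ⟨hnorm, hwf'⟩ := bfs_spec row column board target (i, j) stA.1 h2 hi0 hi hj0 hj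
    have hkfresh : stA.2.1 ∉ stA.2.2.keys := fun hm => absurd (h5 _ hm) (by omega)
    obtain ⟨hv, hk⟩ := dict_insert_fresh_values (pvBfs row column board target (i, j) stA.1).1 hkfresh
    refine ⟨rfl, hwf', by rw [hv, h3], ?_, ?_, ?_⟩
    · rw [hk]; simp only [List.nodup_append, List.nodup_cons]
      exact ⟨h4, by simp, by simpa using fun k hm he => absurd (he ▸ h5 _ hm) (by omega)⟩
    · rw [hk]; intro k hm
      show k < stA.2.1 + 1
      rcases List.mem_append.mp hm with hm | hm
      · have := h5 _ hm; omega
      · simp at hm; omega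
    · intro p hp
      rcases List.mem_append.mp hp with hp | hp
      · exact h6 p hp
      · simp only [List.mem_singleton] at hp; subst hp; exact hnorm
  · exact ⟨h1, h2, h3, h4, h5, h6⟩

theorem scan_row_rel (row column : Int) (board : List (List Int)) (target : Int)
    {i : Int} (hi0 : 0 ≤ i) (hi : i < row) :
    ∀ (js : List Int), (∀ j ∈ js, 0 ≤ j ∧ j < column) →
    ∀ stA stB, pvScanInv row column stA stB →
    pvScanInv row column
      (js.foldl (fun st j =>
        if pvGet2 board i j == target && !(pvGetV st.1 i j) then
          ((pvBfs row column board target (i, j) st.1).2, st.2.1 + 1,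
            st.2.2.insert st.2.1 (pvBfs row column board target (i, j) st.1).1)
        else st) stA)
      (js.foldl (fun st j =>
        if pvGet2 board i j == target && !(pvGetV st.1 i j) then
          ((pvBfs row column board target (i, j) st.1).2,
            st.2 ++ [(pvBfs row column board target (i, j) st.1).1])
        else st) stB) := by
  intro js
  induction js with
  | nil => intro _ stA stB h; exact h
  | cons j js ih =>
      intro hjs stA stB h
      simp only [List.foldl_cons]
      exact ih (fun x hx => hjs x (List.mem_cons_of_mem _ hx)) _ _
        (scan_cell_rel row column board target hi0 hi (hjs j List.mem_cons_self).1
          (hjs j List.mem_cons_self).2 h)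

theorem findPiece_rel (row column : Int) (board : List (List Int)) (target : Int) :
    (pvFindPieceA row column board target).values = pvFindPieceB row column board target ∧
    (pvFindPieceA row column board target).keys.Nodup ∧
    (∀ p ∈ pvFindPieceB row column board target, pvNorm p) := by
  have hmain : ∀ (is : List Int), (∀ i ∈ is, 0 ≤ i ∧ i < row) →
      ∀ stA stB, pvScanInv row column stA stB →
      pvScanInv row column
        (is.foldl (fun st i => (PySem.List.pyRange 0 column 1).foldl (fun st j =>
          if pvGet2 board i j == target && !(pvGetV st.1 i j) then
            ((pvBfs row column board target (i, j) st.1).2, st.2.1 + 1,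
              st.2.2.insert st.2.1 (pvBfs row column board target (i, j) st.1).1)
          else st) st) stA)
        (is.foldl (fun st i => (PySem.List.pyRange 0 column 1).foldl (fun st j =>
          if pvGet2 board i j == target && !(pvGetV st.1 i j) then
            ((pvBfs row column board target (i, j) st.1).2,
              st.2 ++ [(pvBfs row column board target (i, j) st.1).1])
          else st) st) stB) := by
    intro is
    induction is with
    | nil => intro _ stA stB h; exact h
    | cons i is ih =>
        intro his stA stB h
        simp only [List.foldl_cons]
        refine ih (fun x hx => his x (List.mem_cons_of_mem _ hx)) _ _ ?_
        exact scan_row_rel row column board target (his i List.mem_cons_self).1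
          (his i List.mem_cons_self).2 (PySem.List.pyRange 0 column 1)
          (fun j hj => by
            rw [PySem.List.mem_pyRange_one] at hj; exact hj) _ _ h
  have hinit : pvScanInv row column
      (List.replicate row.toNat (List.replicate column.toNat false), (1 : Int),
        (PySem.Dict.empty : PySem.Dict Int (List (Int × Int))))
      (List.replicate row.toNat (List.replicate column.toNat false),
        ([] : List (List (Int × Int)))) := by
    refine ⟨rfl, ⟨by simp, ?_⟩, rfl, by simp [PySem.Dict.keys, PySem.Dict.empty], ?_, by simp⟩
    · intro r hr
      rw [List.eq_of_mem_replicate hr]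
      simp
    · intro k hk
      simp [PySem.Dict.keys, PySem.Dict.empty] at hk
  have h := hmain (PySem.List.pyRange 0 row 1)
    (fun i hi => by rw [PySem.List.mem_pyRange_one] at hi; exact hi) _ _ hinit
  exact ⟨h.2.2.1, h.2.2.2.1, h.2.2.2.2.2⟩

-- ---------- the matching phases agree ----------

theorem tryPieces_spec (blank : List (Int × Int)) :
    ∀ (items : List (Int × List (Int × Int))) (pieces : PySem.Dict Int (List (Int × Int))) (cnt : Int),
    pvTryPieces blank items pieces cnt =
      match items.find? (fun kp => pvCheckRot 4 blank kp.2) with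
      | none => (pieces, cnt)
      | some kp => (pieces.erase kp.1, cnt + PySem.List.len blank) := by
  intro items
  induction items with
  | nil => intro pieces cnt; rfl
  | cons kp rest ih =>
      intro pieces cnt
      rcases kp with ⟨k, p⟩
      by_cases h : pvCheckRot 4 blank p = true
      · simp [pvTryPieces, h]
      · rw [Bool.not_eq_true] at h
        simp [pvTryPieces, h, ih]

theorem erase_split {d : PySem.Dict Int (List (Int × Int))} {k : Int} {p : List (Int × Int)}
    (hnd : d.keys.Nodup) (hm : (k, p) ∈ d.items) :
    ∃ l1 l2, d.items = l1 ++ (k, p) :: l2 ∧ (d.erase k).items = l1 ++ l2 ∧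
      (d.erase k).keys.Nodup := by
  obtain ⟨l1, l2, hsplit⟩ := List.append_of_mem hm
  have hkeys : d.keys = l1.map (·.1) ++ k :: l2.map (·.1) := by
    show d.items.map (·.1) = _
    rw [hsplit]; simp
  rw [hkeys] at hnd
  have hk1 : ∀ q ∈ l1, q.1 ≠ k := by
    intro q hq he
    have : k ∈ l1.map (·.1) := he ▸ List.mem_map_of_mem hq
    rw [List.nodup_append] at hnd
    exact hnd.2.2 k this k List.mem_cons_self rfl
  have hk2 : ∀ q ∈ l2, q.1 ≠ k := by
    intro q hq he
    have hmm : k ∈ l2.map (·.1) := he ▸ List.mem_map_of_mem hq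
    rw [List.nodup_append] at hnd
    exact (List.nodup_cons.mp hnd.2.1).1 hmm
  have hitems : (d.erase k).items = l1 ++ l2 := by
    show d.items.filter (fun q => !(q.1 == k)) = l1 ++ l2
    rw [hsplit, List.filter_append, List.filter_cons]
    simp only [beq_self_eq_true, Bool.not_true, if_neg (by simp : ¬ (false = true))]
    rw [List.filter_eq_self.mpr (by intro q hq; simpa using hk1 q hq),
        List.filter_eq_self.mpr (by intro q hq; simpa using hk2 q hq)]
  refine ⟨l1, l2, hsplit, hitems, ?_⟩
  have : (d.erase k).keys = l1.map (·.1) ++ l2.map (·.1) := by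
    show (d.erase k).items.map (·.1) = _
    rw [hitems]; simp
  rw [this]
  rw [List.nodup_append] at hnd
  exact List.nodup_append.mpr ⟨hnd.1, (List.nodup_cons.mp hnd.2.1).2,
    fun a ha b hb => hnd.2.2 a ha b (List.mem_cons_of_mem _ hb)⟩

theorem count_loop : ∀ (blanks : List (List (Int × Int)))
    (piecesD : PySem.Dict Int (List (Int × Int))) (counts : PySem.Dict (List (Int × Int)) Int)
    (cnt : Int),
    (∀ b ∈ blanks, pvNorm b) → (∀ p ∈ piecesD.values, pvNorm p) → piecesD.keys.Nodup →
    (∀ c, counts.getD c 0 = (piecesD.values.countP (fun p => pvCanon p == c) : Int)) →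
    (blanks.foldl (fun st b => pvTryPieces b st.1.items st.1 st.2) (piecesD, cnt)).2
      = (blanks.foldl (fun st b =>
          if st.1.getD (pvCanon b) 0 > 0 then
            (st.1.insert (pvCanon b) (st.1.getD (pvCanon b) 0 - 1), st.2 + PySem.List.len b)
          else st) (counts, cnt)).2 := by
  intro blanks
  induction blanks with
  | nil => intro piecesD counts cnt _ _ _ _; rfl
  | cons b blanks ih =>
      intro piecesD counts cnt hB hP hnd hRel
      have hbN : pvNorm b := hB b List.mem_cons_self
      simp only [List.foldl_cons]
      rw [tryPieces_spec]
      rcases hf : piecesD.items.find? (fun kp => pvCheckRot 4 b kp.2) with _ | ⟨k, p⟩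
      all_goals rw [hf]
      · -- no piece matches: both sides skip
        have hzero : piecesD.values.countP (fun p => pvCanon p == pvCanon b) = 0 := by
          rw [List.countP_eq_zero]
          intro p hp
          obtain ⟨kp, hkp, rfl⟩ := List.mem_map.mp hp
          have hc := List.find?_eq_none.mp hf kp hkp
          rw [Bool.not_eq_true] at hc
          have hne : pvCanon b ≠ pvCanon kp.2 := fun he =>
            absurd ((match_iff hbN (hP _ hp).1).mpr he) (by rw [hc]; simp)
          simpa using fun he => hne he.symm
        have hcond : ¬ (counts.getD (pvCanon b) 0 > 0) := by
          rw [hRel (pvCanon b), hzero]; simp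
        rw [if_neg hcond]
        exact ih piecesD counts cnt (fun x hx => hB x (List.mem_cons_of_mem _ hx)) hP hnd hRel
      · -- kp = (k, p) matches: A erases it, B decrements the bucket
        have hcheck : pvCheckRot 4 b p = true := by
          have := List.find?_some hf; simpa using this
        have hmem : (k, p) ∈ piecesD.items := List.mem_of_find?_eq_some hf
        have hpv : p ∈ piecesD.values := List.mem_map_of_mem hmem
        have hc : pvCanon b = pvCanon p := (match_iff hbN (hP p hpv).1).mp hcheck
        obtain ⟨l1, l2, hsplit, hitems, hnd'⟩ := erase_split hnd hmem
        have hvals : piecesD.values = l1.map (·.2) ++ p :: l2.map (·.2) := by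
          show piecesD.items.map (·.2) = _
          rw [hsplit]; simp
        have hvals' : (piecesD.erase k).values = l1.map (·.2) ++ l2.map (·.2) := by
          show (piecesD.erase k).items.map (·.2) = _
          rw [hitems]; simp
        have hcond : counts.getD (pvCanon b) 0 > 0 := by
          rw [hRel (pvCanon b), hvals]
          simp only [List.countP_append, List.countP_cons, hc.symm, beq_self_eq_true]
          push_cast
          omega
        rw [if_pos hcond]
        apply ih
        · exact fun x hx => hB x (List.mem_cons_of_mem _ hx)
        · intro q hq
          rw [hvals'] at hq
          apply hP
          rw [hvals]
          rcases List.mem_append.mp hq with h | h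
          · exact List.mem_append_left _ h
          · exact List.mem_append_right _ (List.mem_cons_of_mem _ h)
        · exact hnd'
        · intro c
          rw [PySem.Dict.getD_insert, hvals', hRel c, hvals]
          simp only [List.countP_append, List.countP_cons]
          by_cases hce : c = pvCanon b
          · subst hce
            rw [if_pos rfl]
            rw [hRel (pvCanon b), hvals]
            simp only [List.countP_append, List.countP_cons]
            rw [show (pvCanon p == pvCanon b) = true from by rw [← hc]; exact beq_self_eq_true _]
            rw [if_pos rfl]
            push_cast
            omega
          · rw [if_neg hce]
            have : (pvCanon p == c) = false := by
              rw [← hc]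
              simpa using fun he => hce he.symm
            rw [this]
            push_cast
            omega

theorem counts_rel (pieces : List (List (Int × Int))) (c : List (Int × Int)) :
    (pieces.foldl (fun (d : PySem.Dict (List (Int × Int)) Int) p =>
        d.insert (pvCanon p) (d.getD (pvCanon p) 0 + 1)) PySem.Dict.empty).getD c 0
      = (pieces.countP (fun p => pvCanon p == c) : Int) := by
  rw [← List.foldl_map (f := pvCanon)
      (g := fun (d : PySem.Dict (List (Int × Int)) Int) x => d.insert x (d.getD x 0 + 1))]
  rw [PySem.Dict.getD_foldl_insert_add_one, PySem.Dict.getD_empty]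
  rw [List.count_eq_countP, List.countP_map]
  rw [zero_add]
  rfl

theorem foldl_items_values (d : PySem.Dict Int (List (Int × Int)))
    (init : PySem.Dict Int (List (Int × Int)) × Int) :
    d.items.foldl (fun st ib => pvTryPieces ib.2 st.1.items st.1 st.2) init
      = d.values.foldl (fun st b => pvTryPieces b st.1.items st.1 st.2) init := by
  show _ = (d.items.map (fun x => x.2)).foldl _ _
  rw [List.foldl_map]

theorem solution_spec : Claim_equal_solution := by
  unfold Claim_equal_solution
  intro gb table _ _
  unfold Spec_solution solution solution_alt
  simp only []
  obtain ⟨hvT, hndT, hnT⟩ := findPiece_rel (PySem.List.len gb)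
    (PySem.List.len (PySem.List.pyGetD gb 0 [])) table 1
  obtain ⟨hvG, _, hnG⟩ := findPiece_rel (PySem.List.len gb)
    (PySem.List.len (PySem.List.pyGetD gb 0 [])) gb 0
  rw [foldl_items_values]
  rw [show (pvFindPieceA (PySem.List.len gb) (PySem.List.len (PySem.List.pyGetD gb 0 [])) gb 0).values
      = pvFindPieceB (PySem.List.len gb) (PySem.List.len (PySem.List.pyGetD gb 0 [])) gb 0 from hvG]
  apply count_loop
  · exact hnG
  · rw [hvT]; exact hnT
  · exact hndT
  · intro c
    rw [counts_rel, hvT]
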